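-- pv_equiv track=rewrite | github.com/KYUSEONGHAN/Development | 하루에 한개씩 문제 풀기/Python/BOJ/그리디/11501.py | share
-- ===== SOURCE A (Python) =====
-- def share(n, l):
--     result = 0
--     target = l[0]
--
--     for i in range(1, n):
--         if l[i] > target:
--             target = l[i]
--         else:
--             result += target - l[i]
--
--     return result
-- ===== SOURCE B (Python) =====
-- def share(n, l):
--     # prefix-maximum table, then a summation pass (alternative decomposition of A's single loop)
--     m = l[0]
--     pm = []
--     for x in l[:n]:
--         m = m if m > x else x
--         pm.append(m)
--     return sum(pm[i] - l[i] for i in range(1, n))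
-- ===== Notes on version B (the rewrite author's own statement) =====
-- stated objective: alternative
-- what changed: A keeps a running max and conditionally accumulates in one loop; B first builds a prefix-maximum table over l[:n] and then sums pm[i]-l[i] in a second pass (pm[i]-l[i] is 0 exactly where A's branch skips).
import Mathlib
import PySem

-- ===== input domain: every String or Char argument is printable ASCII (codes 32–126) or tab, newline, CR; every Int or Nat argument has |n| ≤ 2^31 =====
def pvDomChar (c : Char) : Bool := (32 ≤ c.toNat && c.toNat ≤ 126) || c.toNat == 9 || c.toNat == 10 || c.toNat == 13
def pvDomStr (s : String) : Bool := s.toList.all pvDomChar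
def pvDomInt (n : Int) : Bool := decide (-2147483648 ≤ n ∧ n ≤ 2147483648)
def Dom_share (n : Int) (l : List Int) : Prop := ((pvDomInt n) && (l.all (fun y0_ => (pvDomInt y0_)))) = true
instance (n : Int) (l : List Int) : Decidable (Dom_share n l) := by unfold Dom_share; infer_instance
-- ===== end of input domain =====

-- B builds a prefix-maximum table over l[:n] and then sums pm[i] - l[i] in a second pass;
-- same return value as A's single running-max loop (objective: alternative decomposition).

-- ===== PORT A =====
def share (n : Int) (l : List Int) : Int :=
  match PySem.List.pyGet? l 0 with
  | none => 0   -- unreachable under Pre_share: Python raises IndexError on empty l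
  | some t0 =>
    ((PySem.List.pyRange 1 n 1).foldl
      (fun (st : Int × Int) i =>
        let x := PySem.List.pyGetD l i 0   -- in range under Pre_share
        if x > st.2 then (st.1, x) else (st.1 + (st.2 - x), st.2))
      (0, t0)).1

-- ===== PORT B =====
-- the prefix-max accumulation loop of Source B (m carried, values appended in order)
def pmList (m : Int) : List Int → List Int
  | [] => []
  | x :: xs =>
    let m' := if m > x then m else x
    m' :: pmList m' xs

def share_alt (n : Int) (l : List Int) : Int :=
  match PySem.List.pyGet? l 0 with
  | none => 0   -- unreachable under Pre_share: Python raises IndexError on empty l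
  | some t0 =>
    let pm := pmList t0 (PySem.List.slice l none (some n))
    (PySem.List.pyRange 1 n 1).foldl
      (fun s i => s + (PySem.List.pyGetD pm i 0 - PySem.List.pyGetD l i 0)) 0

-- ===== PRECONDITION & SPEC =====
-- Pre_share: exactly where Python A returns — l must be nonempty (l[0]) and every
-- accessed index 1..n-1 in range, i.e. n ≤ len(l); otherwise A raises IndexError.
def Pre_share (n : Int) (l : List Int) : Prop := l ≠ [] ∧ n ≤ l.length
instance (n : Int) (l : List Int) : Decidable (Pre_share n l) := by unfold Pre_share; infer_instance

def pvWitness_share : Int × List Int := (4, [3, 1, 4, 2])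

def Spec_share (n : Int) (l : List Int) (out : Int) : Prop := out = share_alt n l
instance (n : Int) (l : List Int) (out : Int) : Decidable (Spec_share n l out) := by unfold Spec_share; infer_instance

-- ===== CLAIM (what is proved, stated in full; the proofs are below) =====
def Claim_equal_share : Prop := ∀ (n : Int) (l : List Int), Dom_share n l → Pre_share n l → Spec_share n l (share n l)

-- ===== LEMMAS AND PROOFS =====

lemma pmList_getElem? (xs : List Int) (m : Int) (k : Nat) (hk : k < xs.length) :
    (pmList m xs)[k]? = some ((xs.take (k + 1)).foldl (fun a x => if a > x then a else x) m) := by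
  induction xs generalizing m k with
  | nil => simp at hk
  | cons x xs ih =>
    cases k with
    | zero => simp [pmList]
    | succ k =>
      simp only [pmList, List.getElem?_cons_succ, List.take_succ_cons, List.foldl_cons]
      exact ih _ k (by simpa using hk)

-- the two loops, related: A's fold state equals (B's partial sum, current prefix max)
lemma fold_eq (l : List Int) (t0 : Int) (h0 : l[0]? = some t0) (pm : List Int)
    (j : Nat) :
    1 ≤ j → j ≤ l.length →
    (∀ k : Nat, k < j →
      pm[k]? = some ((l.take (k + 1)).foldl (fun a x => if a > x then a else x) t0)) →
    (PySem.List.pyRange 1 (j : Int) 1).foldl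
      (fun (st : Int × Int) i =>
        let x := PySem.List.pyGetD l i 0
        if x > st.2 then (st.1, x) else (st.1 + (st.2 - x), st.2)) (0, t0)
    = ((PySem.List.pyRange 1 (j : Int) 1).foldl
        (fun s i => s + (PySem.List.pyGetD pm i 0 - PySem.List.pyGetD l i 0)) 0,
       (l.take j).foldl (fun a x => if a > x then a else x) t0) := by
  induction j with
  | zero => intro h; omega
  | succ j ih =>
    intro hj1 hjl hpm
    rcases Nat.lt_or_ge j 1 with hj0 | hj0
    · -- j = 0 : range over [] on both sides, take 1 l = [t0]
      interval_cases j
      rw [PySem.List.pyRange_one_eq_nil (by norm_num)]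
      rcases l with _ | ⟨a, r⟩
      · simp at h0
      · simp at h0
        simp [List.foldl, h0]
    · have hcast : ((j + 1 : Nat) : Int) = (j : Int) + 1 := by push_cast; ring
      rw [hcast, PySem.List.pyRange_one_succ_right (by exact_mod_cast hj0), List.foldl_append,
        List.foldl_append, ih hj0 (by omega) (fun k hk => hpm k (by omega))]
      have hjlen : j < l.length := by omega
      have hx : PySem.List.pyGetD l (j : Int) 0 = l[j] := by
        rw [PySem.List.pyGetD_natCast]; simp [List.getD, hjlen]
      have hpmj : PySem.List.pyGetD pm (j : Int) 0
          = (l.take (j + 1)).foldl (fun a x => if a > x then a else x) t0 := by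
        rw [PySem.List.pyGetD_natCast]
        simp [List.getD, hpm j (by omega)]
      have htake : (l.take (j + 1)).foldl (fun a x => if a > x then a else x) t0
          = (fun a x => if a > x then a else x)
              ((l.take j).foldl (fun a x => if a > x then a else x) t0) l[j] := by
        rw [List.take_add_one, List.foldl_append]
        simp [hjlen]
      simp only [List.foldl_cons, List.foldl_nil, hx, hpmj, htake]
      set M := (l.take j).foldl (fun a x => if a > x then a else x) t0 with hM
      by_cases hc : l[j] > M
      · have : ¬ M > l[j] := by omega
        simp [hc, this]
      · have : M > l[j] ∨ M = l[j] := by omega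
        rcases this with h | h
        · simp [hc, h]
        · simp [← h]

-- ===== VERDICT (by name: the statement is the Claim_ definition above) =====
theorem share_spec : Claim_equal_share := by
  intro n l _ hpre
  obtain ⟨hne, hlen⟩ := hpre
  unfold Spec_share share share_alt
  have h0 : PySem.List.pyGet? l 0 = l[0]? := PySem.List.pyGet?_zero l
  obtain ⟨t0, ht0⟩ : ∃ t0, l[0]? = some t0 := by
    rcases l with _ | ⟨a, r⟩
    · exact absurd rfl hne
    · exact ⟨a, rfl⟩
  rw [h0, ht0]
  dsimp only
  rcases Int.lt_or_le n 1 with hn | hn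
  · rw [PySem.List.pyRange_one_eq_nil (by omega)]
    rfl
  · -- n ≥ 1: both loops run over range(1, n); take j := n.toNat
    have hn0 : 0 ≤ n := by omega
    have hcast : ((n.toNat : Int)) = n := Int.toNat_of_nonneg hn0
    have hslice : PySem.List.slice l none (some n) = l.take n.toNat :=
      PySem.List.slice_to l hn0
    have hjl : n.toNat ≤ l.length := by omega
    have hpm : ∀ k : Nat, k < n.toNat →
        (pmList t0 (l.take n.toNat))[k]? = some ((l.take (k + 1)).foldl
          (fun a x => if a > x then a else x) t0) := by
      intro k hk
      rw [pmList_getElem? _ t0 k (by simp; omega)]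
      congr 2
      rw [List.take_take]
      congr 1
      omega
    have hmain := fold_eq l t0 ht0 (pmList t0 (l.take n.toNat)) n.toNat (by omega) hjl hpm
    rw [hcast] at hmain
    rw [hslice, hmain]
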